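-- pv_equiv track=rewrite | github.com/mlockwood/bioinformatics | generic.py | get_all_binary_kmers
-- ===== SOURCE A (Python) =====
-- def get_all_binary_kmers(k, kmer=''):
--     """
--         Generate a dictionary of all kmers for k. This is for the
--         universal string problem so these are binary.
--         :param k: length of kmer
--         :param kmer: a dummy value that will be built into kmers
--         :return: {kmer: 0}
--         """
--     kmers = {}
--     # Base case by adding the kmer to resulting output
--     if len(kmer) == k:
--         return {kmer: 0}
--
--     # Recurse another layer (length) for each base in [0, 1]
--     else:
--         for base in ['0', '1']:
--             kmers.update(get_all_binary_kmers(k, '{}{}'.format(kmer, base)))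
--         return kmers
-- ===== SOURCE B (Python) =====
-- def get_all_binary_kmers(k, kmer=''):
--     """Iterative level-by-level build: extend suffixes one bit at a time."""
--     suffixes = ['']
--     for _ in range(k - len(kmer)):
--         suffixes = [s + b for s in suffixes for b in '01']
--     return {kmer + s: 0 for s in suffixes}
-- ===== Notes on version B (the rewrite author's own statement) =====
-- stated objective: simpler
-- what changed: Replaces A's binary recursion with per-branch dict.update by an iterative level-by-level build of all suffixes in one loop plus a single dict comprehension.
import Mathlib
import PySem

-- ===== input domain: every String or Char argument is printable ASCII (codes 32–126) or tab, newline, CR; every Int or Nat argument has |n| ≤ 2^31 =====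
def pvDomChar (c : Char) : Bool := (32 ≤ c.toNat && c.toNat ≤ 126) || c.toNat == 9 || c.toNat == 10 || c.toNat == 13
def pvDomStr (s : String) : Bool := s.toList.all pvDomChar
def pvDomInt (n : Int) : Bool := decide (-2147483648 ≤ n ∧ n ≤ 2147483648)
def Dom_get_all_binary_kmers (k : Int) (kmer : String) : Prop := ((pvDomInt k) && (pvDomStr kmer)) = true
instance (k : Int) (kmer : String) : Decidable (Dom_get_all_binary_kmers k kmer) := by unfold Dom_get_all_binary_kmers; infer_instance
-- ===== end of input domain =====

-- B replaces A's binary recursion (dict.update per branch) by an iterative level-by-level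
-- suffix build (objective: simpler/idiomatic; same asymptotic cost).

-- ===== PORT A =====
-- A recurses with kmer one char longer until len(kmer) == k; the recursion depth is
-- (k - len(kmer)), so the port carries that as Nat fuel. Inside Pre_ (len(kmer) ≤ k)
-- the fuel is exact and the `[]` fuel-exhaustion branch is unreachable (in Python A
-- diverges there: RecursionError, excluded by Pre_). dict.update is appended directly:
-- the keys produced by the two branches are distinct strings, so insertion = append.
def goA (fuel : Nat) (k : Int) (kmer : List Char) : List (List Char × Int) :=
  if (kmer.length : Int) = k then [(kmer, 0)]
  else
    match fuel with
    | 0 => []   -- unreachable under Pre_ (Python A raises RecursionError here)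
    | f + 1 => goA f k (kmer ++ ['0']) ++ goA f k (kmer ++ ['1'])

def get_all_binary_kmers (k : Int) (kmer : String) : List (String × Int) :=
  (goA (k - (kmer.toList.length : Int)).toNat k kmer.toList).map
    (fun p => (String.ofList p.1, p.2))

-- ===== PORT B =====
-- Source B: suffixes = ['']; for _ in range(k - len(kmer)): suffixes = [s+b for s in suffixes for b in '01']
def get_all_binary_kmers_alt (k : Int) (kmer : String) : List (String × Int) :=
  let n : Int := k - (kmer.toList.length : Int)
  let suffixes :=
    (PySem.List.pyRange 0 n 1).foldl
      (fun acc _ => acc.flatMap (fun s => ['0', '1'].map (fun b => s ++ [b]))) [([] : List Char)]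
  suffixes.map (fun s => (String.ofList (kmer.toList ++ s), (0 : Int)))

-- ===== PRECONDITION & SPEC =====
-- Pre_ excludes exactly the inputs with len(kmer) > k, on which Python A never reaches
-- its base case and raises RecursionError (returns no value).
def Pre_get_all_binary_kmers (k : Int) (kmer : String) : Prop :=
  (kmer.toList.length : Int) ≤ k
instance (k : Int) (kmer : String) : Decidable (Pre_get_all_binary_kmers k kmer) := by
  unfold Pre_get_all_binary_kmers; infer_instance

def pvWitness_get_all_binary_kmers : Int × String := (3, "1")

def Spec_get_all_binary_kmers (k : Int) (kmer : String) (out : List (String × Int)) : Prop := out = get_all_binary_kmers_alt k kmer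
instance (k : Int) (kmer : String) (out : List (String × Int)) : Decidable (Spec_get_all_binary_kmers k kmer out) := by unfold Spec_get_all_binary_kmers; infer_instance

-- ===== CLAIM (what is proved, stated in full; the proofs are below) =====
def Claim_equal_get_all_binary_kmers : Prop := ∀ (k : Int) (kmer : String), Dom_get_all_binary_kmers k kmer → Pre_get_all_binary_kmers k kmer → Spec_get_all_binary_kmers k kmer (get_all_binary_kmers k kmer)

-- ===== LEMMAS AND PROOFS =====

-- All binary strings of length n, most-significant bit first (prepend decomposition).
def lexBits : Nat → List (List Char)
  | 0 => [[]]
  | n + 1 => (lexBits n).map (('0' :: ·)) ++ (lexBits n).map (('1' :: ·))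

def stepB (acc : List (List Char)) : List (List Char) :=
  acc.flatMap (fun s => ['0', '1'].map (fun b => s ++ [b]))

-- append decomposition equals prepend decomposition
theorem stepB_lexBits (n : Nat) : stepB (lexBits n) = lexBits (n + 1) := by
  induction n with
  | zero => decide
  | succ n ih =>
    have h : ∀ c : Char, stepB ((lexBits n).map (c :: ·)) = (stepB (lexBits n)).map (c :: ·) := by
      intro c
      simp [stepB, List.flatMap_map, List.map_flatMap]
    calc stepB (lexBits (n + 1))
        = stepB ((lexBits n).map ('0' :: ·)) ++ stepB ((lexBits n).map ('1' :: ·)) := by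
          simp [lexBits, stepB, List.flatMap_append]
      _ = (stepB (lexBits n)).map ('0' :: ·) ++ (stepB (lexBits n)).map ('1' :: ·) := by
          rw [h, h]
      _ = lexBits (n + 2) := by rw [ih]; rfl

theorem foldl_ignore {α : Type} (f : α → α) (l : List Int) (init : α) :
    l.foldl (fun acc _ => f acc) init = f^[l.length] init := by
  induction l generalizing init with
  | nil => rfl
  | cons x xs ih => simp [List.foldl, ih, Function.iterate_succ_apply]

theorem iterate_stepB (n : Nat) : stepB^[n] [[]] = lexBits n := by
  induction n with
  | zero => rfl
  | succ n ih => rw [Function.iterate_succ_apply', ih, stepB_lexBits]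

theorem goA_eq (fuel : Nat) (k : Int) (cs : List Char)
    (h : (cs.length : Int) + fuel = k) :
    goA fuel k cs = (lexBits fuel).map (fun s => (cs ++ s, (0 : Int))) := by
  induction fuel generalizing cs with
  | zero =>
    rw [goA]
    simp at h
    simp [h, lexBits]
  | succ f ih =>
    rw [goA]
    have hne : ¬ ((cs.length : Int) = k) := by omega
    rw [if_neg hne]
    have h0 : ((cs ++ ['0']).length : Int) + f = k := by simp; omega
    have h1 : ((cs ++ ['1']).length : Int) + f = k := by simp; omega
    rw [ih _ h0, ih _ h1]
    simp [lexBits, Function.comp_def, List.append_assoc]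

-- ===== VERDICT (by name: the statement is the Claim_ definition above) =====
theorem get_all_binary_kmers_spec : Claim_equal_get_all_binary_kmers := by
  intro k kmer _ hpre
  unfold Spec_get_all_binary_kmers get_all_binary_kmers get_all_binary_kmers_alt
  have hpre' : (kmer.toList.length : Int) ≤ k := hpre
  set cs := kmer.toList with hcs
  have hn : (cs.length : Int) + ((k - (cs.length : Int)).toNat : Int) = k := by omega
  rw [goA_eq _ _ _ hn]
  show _ = (((PySem.List.pyRange 0 (k - (cs.length : Int)) 1).foldl
      (fun acc _ => stepB acc) [([] : List Char)]).map _)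
  rw [foldl_ignore stepB, PySem.List.length_pyRange_one, iterate_stepB]
  simp
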